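-- pv_equiv track=rewrite | github.com/Aasthaengg/IBMdataset | Python_codes/p03330/s681120995.py | f
-- ===== SOURCE A (Python) =====
-- def f(C, D, F, r):
--     import collections
--
--     L = []
--     for i, f0 in enumerate(F):
--         for j, c in enumerate(f0):
--             if (i + j) % 3 != r:
--                 continue
--             L.append(c - 1)
--     d = collections.Counter(L)
--     res = []
--     for x in range(C):
--         tmp = 0
--         for y, v in d.items():
--             tmp += D[y][x] * v
--
--         res.append((x, tmp))
--
--     res.sort(key=lambda l: l[1])
--     return res[:3]
-- ===== SOURCE B (Python) =====
-- def f(C, D, F, r):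
--     # Per-target-color decomposition: for each candidate color x, scan the grid
--     # directly summing D[ch-1][x] over matching cells (no Counter, no grouping pass).
--     def cell_cost(x):
--         t = 0
--         i = 0
--         for row in F:
--             j = 0
--             for ch in row:
--                 if (i + j) % 3 == r:
--                     t += D[ch - 1][x]
--                 j += 1
--             i += 1
--         return t
--     res = sorted(((x, cell_cost(x)) for x in range(C)), key=lambda p: p[1])
--     return res[:3]
-- ===== Notes on version B (the rewrite author's own statement) =====
-- stated objective: alternative
-- what changed: B removes the Counter/grouping stage entirely: for each candidate color x it scans the grid once, summing D[ch-1][x] over matching cells via recursive-style row/column counters, then sorts the (x,cost) pairs; A first collects matching cells into a Counter and then does a per-distinct-color inner scan for each x.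
import Mathlib
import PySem

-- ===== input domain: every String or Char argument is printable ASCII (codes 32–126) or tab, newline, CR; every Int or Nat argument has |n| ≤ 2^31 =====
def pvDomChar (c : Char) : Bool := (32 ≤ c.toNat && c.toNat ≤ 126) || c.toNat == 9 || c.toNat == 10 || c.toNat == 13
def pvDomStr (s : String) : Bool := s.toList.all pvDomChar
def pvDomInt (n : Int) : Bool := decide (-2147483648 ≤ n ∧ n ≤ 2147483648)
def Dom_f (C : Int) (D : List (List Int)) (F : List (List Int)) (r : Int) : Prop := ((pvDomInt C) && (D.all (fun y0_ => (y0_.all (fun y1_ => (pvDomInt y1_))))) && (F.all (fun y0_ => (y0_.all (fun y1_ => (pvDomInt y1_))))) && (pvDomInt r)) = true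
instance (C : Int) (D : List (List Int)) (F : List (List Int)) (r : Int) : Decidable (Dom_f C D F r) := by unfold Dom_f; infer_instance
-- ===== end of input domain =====

-- B replaces A's Counter/grouping stage by a direct per-candidate-color grid scan
-- (recursive row/column counters); an alternative decomposition, not claimed faster.

-- ===== PORT A =====
def f (C : Int) (D : List (List Int)) (F : List (List Int)) (r : Int) : List (Int × Int) :=
  let L : List Int := (PySem.List.enumerate F 0).foldl (fun L p =>
      (PySem.List.enumerate p.2 0).foldl (fun L q =>
        if PySem.Int.mod (p.1 + q.1) 3 ≠ r then L else L ++ [q.2 - 1]) L) []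
  let d := PySem.Dict.counter L
  let res := (PySem.List.pyRange 0 C 1).foldl (fun res x =>
      let tmp := d.items.foldl (fun tmp yv =>
        tmp + PySem.List.pyGetD (PySem.List.pyGetD D yv.1 []) x 0 * yv.2) 0
      res ++ [(x, tmp)]) []
  (PySem.List.sorted res (fun l => l.2) false).take 3

-- ===== PORT B =====
-- inner 'for ch in row' loop of cell_cost, with column counter j and accumulator t
def rowCost (D : List (List Int)) (r x i : Int) : Int → Int → List Int → Int
  | _, t, [] => t
  | j, t, ch :: rest =>
      rowCost D r x i (j + 1)
        (if PySem.Int.mod (i + j) 3 = r then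
          t + PySem.List.pyGetD (PySem.List.pyGetD D (ch - 1) []) x 0
        else t) rest

-- outer 'for row in F' loop of cell_cost, with row counter i and accumulator t
def gridCost (D : List (List Int)) (r x : Int) : Int → Int → List (List Int) → Int
  | _, t, [] => t
  | i, t, row :: rest => gridCost D r x (i + 1) (rowCost D r x i 0 t row) rest

def cellCost (D : List (List Int)) (F : List (List Int)) (r x : Int) : Int :=
  gridCost D r x 0 0 F

def f_alt (C : Int) (D : List (List Int)) (F : List (List Int)) (r : Int) : List (Int × Int) :=
  (PySem.List.sorted
    ((PySem.List.pyRange 0 C 1).map (fun x => (x, cellCost D F r x)))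
    (fun p => p.2) false).take 3

-- ===== PRECONDITION & SPEC =====
-- Pre_f excludes exactly the inputs where the Pythons raise IndexError: when C > 0, every grid
-- cell in the selected residue class must name a valid row of D (Python indexing, negative
-- wraparound allowed) of length at least C.
def Pre_f (C : Int) (D : List (List Int)) (F : List (List Int)) (r : Int) : Prop :=
  (decide (C ≤ 0) ||
    (PySem.List.enumerate F 0).all (fun p => (PySem.List.enumerate p.2 0).all (fun q =>
      !(decide (PySem.Int.mod (p.1 + q.1) 3 = r)) ||
        (match PySem.List.pyGet? D (q.2 - 1) with
         | some row => decide (C ≤ (row.length : Int))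
         | none => false)))) = true
instance (C : Int) (D : List (List Int)) (F : List (List Int)) (r : Int) : Decidable (Pre_f C D F r) := by unfold Pre_f; infer_instance
def pvWitness_f : Int × List (List Int) × List (List Int) × Int := (1, [[0]], [[1]], 0)
def Spec_f (C : Int) (D : List (List Int)) (F : List (List Int)) (r : Int) (out : List (Int × Int)) : Prop := out = f_alt C D F r
instance (C : Int) (D : List (List Int)) (F : List (List Int)) (r : Int) (out : List (Int × Int)) : Decidable (Spec_f C D F r out) := by unfold Spec_f; infer_instance

-- ===== CLAIM (what is proved, stated in full; the proofs are below) =====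
def Claim_equal_f : Prop := ∀ (C : Int) (D : List (List Int)) (F : List (List Int)) (r : Int), Dom_f C D F r → Pre_f C D F r → Spec_f C D F r (f C D F r)

-- ===== LEMMAS AND PROOFS =====

-- the value added at cost index x by a cell holding color index y
def gY (D : List (List Int)) (x y : Int) : Int :=
  PySem.List.pyGetD (PySem.List.pyGetD D y []) x 0

-- the (c-1)-values of matching cells of the rows enumerated from i, in scan order
def cellsFrom (F : List (List Int)) (r i : Int) : List Int :=
  (PySem.List.enumerate F i).flatMap (fun p =>
    ((PySem.List.enumerate p.2 0).filter
      (fun q => decide (PySem.Int.mod (p.1 + q.1) 3 = r))).map (fun q => q.2 - 1))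

theorem sum_indicator (S : List Int) (a : Int) (g : Int → Int) (hnd : S.Nodup) (ha : a ∈ S) :
    (S.map (fun k => if k = a then g k else 0)).sum = g a := by
  induction S with
  | nil => cases ha
  | cons s S ih =>
      simp only [List.map_cons, List.sum_cons]
      rcases List.mem_cons.1 ha with h | h
      · subst h
        have : ∀ k ∈ S, (if k = a then g k else 0) = 0 := by
          intro k hk
          have : k ≠ a := fun he => (List.nodup_cons.1 hnd).1 (he ▸ hk)
          simp [this]
        rw [if_pos rfl, List.map_congr_left this]
        simp
      · have hsa : s ≠ a := fun he => (List.nodup_cons.1 hnd).1 (he ▸ h)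
        rw [if_neg hsa, ih (List.nodup_cons.1 hnd).2 h]
        simp

theorem countsum (L S : List Int) (g : Int → Int) (hnd : S.Nodup) (hm : ∀ c ∈ L, c ∈ S) :
    (S.map (fun k => g k * (L.count k : Int))).sum = (L.map g).sum := by
  induction L with
  | nil => simp
  | cons a L ih =>
      have step : ∀ k ∈ S, g k * ((a :: L).count k : Int)
          = g k * (L.count k : Int) + (if k = a then g k else 0) := by
        intro k _
        rw [List.count_cons]
        by_cases h : k = a
        · simp [h]; ring
        · simp [h, Ne.symm h]
      rw [List.map_congr_left step, PySem.List.sum_map_add_int, ih (fun c hc => hm c (List.mem_cons_of_mem _ hc)),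
        sum_indicator S a g hnd (hm a List.mem_cons_self)]
      simp [List.map_cons, add_comm]

theorem A_L_eq (F : List (List Int)) (r : Int) :
    (PySem.List.enumerate F 0).foldl (fun L p =>
      (PySem.List.enumerate p.2 0).foldl (fun L q =>
        if PySem.Int.mod (p.1 + q.1) 3 ≠ r then L else L ++ [q.2 - 1]) L) []
    = cellsFrom F r 0 := by
  unfold cellsFrom
  have inner : ∀ (p : Int × List Int) (L : List Int),
      (PySem.List.enumerate p.2 0).foldl (fun L q =>
        if PySem.Int.mod (p.1 + q.1) 3 ≠ r then L else L ++ [q.2 - 1]) L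
      = L ++ ((PySem.List.enumerate p.2 0).filter
          (fun q => decide (PySem.Int.mod (p.1 + q.1) 3 = r))).map (fun q => q.2 - 1) := by
    intro p L
    simp only [ne_eq, ite_not]
    exact PySem.List.foldl_append_ite
      (p := fun q : Int × Int => PySem.Int.mod (p.1 + q.1) 3 = r) (f := fun q => q.2 - 1) _ _
  simp only [inner]
  rw [PySem.List.foldl_append_eq_flatMap, List.nil_append]

theorem A_tmp_eq (L : List Int) (D : List (List Int)) (x : Int) :
    (PySem.Dict.counter L).items.foldl (fun tmp yv =>
      tmp + PySem.List.pyGetD (PySem.List.pyGetD D yv.1 []) x 0 * yv.2) 0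
    = (L.map (gY D x)).sum := by
  rw [PySem.List.foldl_add (g := fun yv : Int × Int =>
    PySem.List.pyGetD (PySem.List.pyGetD D yv.1 []) x 0 * yv.2), PySem.Dict.items_counter,
    List.map_map]
  refine (zero_add _).trans ?_
  exact countsum L (PySem.Set.ofList L) (gY D x) (PySem.Set.nodup_ofList L)
    (fun c hc => (PySem.Set.mem_ofList L c).2 hc)

theorem rowCost_eq (D : List (List Int)) (r x i : Int) (row : List Int) :
    ∀ (j t : Int), rowCost D r x i j t row
      = t + (((PySem.List.enumerate row j).filter
          (fun q => decide (PySem.Int.mod (i + q.1) 3 = r))).map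
            (fun q => gY D x (q.2 - 1))).sum := by
  induction row with
  | nil => intro j t; simp [rowCost, PySem.List.enumerate_nil]
  | cons ch rest ih =>
      intro j t
      rw [rowCost, ih, PySem.List.enumerate_cons, List.filter_cons]
      by_cases h : PySem.Int.mod (i + j) 3 = r
      · rw [if_pos h, if_pos (decide_eq_true h), List.map_cons, List.sum_cons]
        show t + gY D x (ch - 1) + _ = _
        rw [add_assoc]
      · rw [if_neg h, if_neg (by simpa using h)]

theorem gridCost_eq (D : List (List Int)) (r x : Int) (F : List (List Int)) :
    ∀ (i t : Int), gridCost D r x i t F = t + ((cellsFrom F r i).map (gY D x)).sum := by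
  induction F with
  | nil => intro i t; simp [gridCost, cellsFrom, PySem.List.enumerate_nil]
  | cons row rest ih =>
      intro i t
      rw [gridCost, ih, rowCost_eq]
      unfold cellsFrom
      rw [PySem.List.enumerate_cons, List.flatMap_cons, List.map_append, List.sum_append,
        List.map_map, add_assoc]
      rfl

-- ===== VERDICT (by name: the statement is the Claim_ definition above) =====
theorem f_spec : Claim_equal_f := by
  intro C D F r _ _
  unfold Spec_f f f_alt
  dsimp only
  rw [A_L_eq]
  simp only [A_tmp_eq]
  rw [PySem.List.foldl_append_singleton_eq_map, List.nil_append]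
  have : ∀ y ∈ PySem.List.pyRange 0 C 1,
      ((y, ((cellsFrom F r 0).map (gY D y)).sum) : Int × Int) = (y, cellCost D F r y) := by
    intro y _
    unfold cellCost
    rw [gridCost_eq, zero_add]
  rw [List.map_congr_left this]
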